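-- pv_equiv track=rewrite | github.com/KernelFlow-ops/cuda-opt-agent | src/cuda_opt_agent/models/enums.py | get_synergies_for
-- ===== SOURCE A (Python) =====
-- SUBSPACE_SYNERGIES: list[tuple[str, str, str]] = [
--     ("memory-coalescing", "vectorized-memory-access", "合并访问后用向量加载进一步减少指令数"),
--     ("shared-mem-tiling", "bank-conflict-resolution", "tiling 引入共享内存后必须检查 bank conflict"),
--     ("shared-mem-tiling", "async-memory-pipeline", "异步拷贝是 tiling 的自然升级路径"),
--     ("occupancy-tuning", "register-optimization", "二者通过寄存器用量耦合"),
--     ("thread-coarsening", "vectorized-memory-access", "粗化后每线程可用向量加载处理更多数据"),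
--     ("warp-specialization", "async-memory-pipeline", "warp 特化的基础是异步内存流水线"),
-- ]
--
-- def get_synergies_for(subspace: str) -> list[tuple[str, str]]:
--     r = []
--     for a, b, reason in SUBSPACE_SYNERGIES:
--         if a == subspace:
--             r.append((b, reason))
--         elif b == subspace:
--             r.append((a, reason))
--     return r
-- ===== SOURCE B (Python) =====
-- SUBSPACE_SYNERGIES: list[tuple[str, str, str]] = [
--     ("memory-coalescing", "vectorized-memory-access", "合并访问后用向量加载进一步减少指令数"),
--     ("shared-mem-tiling", "bank-conflict-resolution", "tiling 引入共享内存后必须检查 bank conflict"),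
--     ("shared-mem-tiling", "async-memory-pipeline", "异步拷贝是 tiling 的自然升级路径"),
--     ("occupancy-tuning", "register-optimization", "二者通过寄存器用量耦合"),
--     ("thread-coarsening", "vectorized-memory-access", "粗化后每线程可用向量加载处理更多数据"),
--     ("warp-specialization", "async-memory-pipeline", "warp 特化的基础是异步内存流水线"),
-- ]
--
-- _INDEX: dict = {}
-- for _a, _b, _reason in SUBSPACE_SYNERGIES:
--     _INDEX.setdefault(_a, []).append((_b, _reason))
--     _INDEX.setdefault(_b, []).append((_a, _reason))
--
-- def get_synergies_for(subspace: str) -> list: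
--     return list(_INDEX.get(subspace, []))
-- ===== Notes on version B (the rewrite author's own statement) =====
-- stated objective: simpler
-- what changed: Replaces the per-call linear scan over SUBSPACE_SYNERGIES (with per-row branching) by a dict index built once at module load; each call is a single dict lookup returning a fresh copy of the stored list.
import Mathlib
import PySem

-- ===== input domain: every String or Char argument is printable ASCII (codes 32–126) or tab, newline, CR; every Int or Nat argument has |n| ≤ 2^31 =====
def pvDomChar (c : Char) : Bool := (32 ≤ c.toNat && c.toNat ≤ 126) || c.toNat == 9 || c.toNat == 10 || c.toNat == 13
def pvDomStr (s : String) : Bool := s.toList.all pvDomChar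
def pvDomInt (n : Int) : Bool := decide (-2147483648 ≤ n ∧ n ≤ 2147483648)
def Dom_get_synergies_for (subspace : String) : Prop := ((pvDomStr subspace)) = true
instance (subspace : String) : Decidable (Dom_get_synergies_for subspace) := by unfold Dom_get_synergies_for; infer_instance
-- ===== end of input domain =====

-- B replaces A's per-call scan over SUBSPACE_SYNERGIES by a dict index built once at module load; each call is a single lookup (simpler call path; speed not measured).


def SUBSPACE_SYNERGIES : List (String × String × String) := [
  ("memory-coalescing", "vectorized-memory-access", "合并访问后用向量加载进一步减少指令数"),
  ("shared-mem-tiling", "bank-conflict-resolution", "tiling 引入共享内存后必须检查 bank conflict"),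
  ("shared-mem-tiling", "async-memory-pipeline", "异步拷贝是 tiling 的自然升级路径"),
  ("occupancy-tuning", "register-optimization", "二者通过寄存器用量耦合"),
  ("thread-coarsening", "vectorized-memory-access", "粗化后每线程可用向量加载处理更多数据"),
  ("warp-specialization", "async-memory-pipeline", "warp 特化的基础是异步内存流水线")]

-- ===== PORT A =====
def get_synergies_for (subspace : String) : List (String × String) :=
  SUBSPACE_SYNERGIES.foldl
    (fun r t =>
      if t.1 == subspace then r ++ [(t.2.1, t.2.2)]
      else if t.2.1 == subspace then r ++ [(t.1, t.2.2)]
      else r) []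

-- ===== PORT B =====
-- module-load pass: setdefault(k, []).append(p)  =  modify k [] (· ++ [p])
def synergyIndex : PySem.Dict String (List (String × String)) :=
  SUBSPACE_SYNERGIES.foldl
    (fun d t =>
      (d.modify t.1 [] (· ++ [(t.2.1, t.2.2)])).modify t.2.1 [] (· ++ [(t.1, t.2.2)]))
    PySem.Dict.empty

def get_synergies_for_alt (subspace : String) : List (String × String) :=
  synergyIndex.getD subspace []

-- ===== PRECONDITION & SPEC =====
def Spec_get_synergies_for (subspace : String) (out : List (String × String)) : Prop := out = get_synergies_for_alt subspace
instance (subspace : String) (out : List (String × String)) : Decidable (Spec_get_synergies_for subspace out) := by unfold Spec_get_synergies_for; infer_instance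

-- ===== CLAIM (what is proved, stated in full; the proofs are below) =====
def Claim_equal_get_synergies_for : Prop := ∀ (subspace : String), Dom_get_synergies_for subspace → Spec_get_synergies_for subspace (get_synergies_for subspace)

-- ===== LEMMAS AND PROOFS =====
-- The module-load fold evaluates to this literal index (checked by kernel evaluation).
theorem synergyIndex_eq : synergyIndex = PySem.Dict.mk [
  ("memory-coalescing", [("vectorized-memory-access", "合并访问后用向量加载进一步减少指令数")]),
  ("vectorized-memory-access", [("memory-coalescing", "合并访问后用向量加载进一步减少指令数"), ("thread-coarsening", "粗化后每线程可用向量加载处理更多数据")]),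
  ("shared-mem-tiling", [("bank-conflict-resolution", "tiling 引入共享内存后必须检查 bank conflict"), ("async-memory-pipeline", "异步拷贝是 tiling 的自然升级路径")]),
  ("bank-conflict-resolution", [("shared-mem-tiling", "tiling 引入共享内存后必须检查 bank conflict")]),
  ("async-memory-pipeline", [("shared-mem-tiling", "异步拷贝是 tiling 的自然升级路径"), ("warp-specialization", "warp 特化的基础是异步内存流水线")]),
  ("occupancy-tuning", [("register-optimization", "二者通过寄存器用量耦合")]),
  ("register-optimization", [("occupancy-tuning", "二者通过寄存器用量耦合")]),
  ("thread-coarsening", [("vectorized-memory-access", "粗化后每线程可用向量加载处理更多数据")]),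
  ("warp-specialization", [("async-memory-pipeline", "warp 特化的基础是异步内存流水线")])] := by decide

-- Both sides depend on subspace only through equality with the finitely many names
-- appearing in SUBSPACE_SYNERGIES: case on each, then evaluate both closed programs.
theorem get_synergies_for_eq (s : String) :
    get_synergies_for s = get_synergies_for_alt s := by
  by_cases h1 : s = "memory-coalescing"; · subst h1; decide
  by_cases h2 : s = "vectorized-memory-access"; · subst h2; decide
  by_cases h3 : s = "shared-mem-tiling"; · subst h3; decide
  by_cases h4 : s = "bank-conflict-resolution"; · subst h4; decide
  by_cases h5 : s = "async-memory-pipeline"; · subst h5; decide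
  by_cases h6 : s = "occupancy-tuning"; · subst h6; decide
  by_cases h7 : s = "register-optimization"; · subst h7; decide
  by_cases h8 : s = "thread-coarsening"; · subst h8; decide
  by_cases h9 : s = "warp-specialization"; · subst h9; decide
  rw [get_synergies_for_alt, synergyIndex_eq]
  simp [get_synergies_for, SUBSPACE_SYNERGIES, PySem.Dict.getD,
    PySem.Dict.get?, List.foldl,
    Ne.symm h1, Ne.symm h2, Ne.symm h3, Ne.symm h4, Ne.symm h5, Ne.symm h6,
    Ne.symm h7, Ne.symm h8, Ne.symm h9]

-- ===== VERDICT (by name: the statement is the Claim_ definition above) =====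
theorem get_synergies_for_spec : Claim_equal_get_synergies_for := by
  intro s _
  exact get_synergies_for_eq s
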